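-- pv_equiv track=rewrite | github.com/GStudenikin/Protocol | GLn2.py | subv
-- ===== SOURCE A (Python) =====
-- import copy
--
-- def subv(av,bv):
--     a = copy.deepcopy(av)
--     b = copy.deepcopy(bv)
--     diff = len(a) - len(b)
--     res = []
--     if(diff < 0):
--         for i in range(diff):
--             a.insert(0,0)
--     elif (diff > 0):
--         for i in range(diff):
--             b.insert(0, 0)
--     for i in range(len(a)):
--         res.append(a[i] - b[i])
--     return res
-- ===== SOURCE B (Python) =====
-- def subv(av, bv):
--     if len(av) <= len(bv):
--         return [x - y for x, y in zip(av, bv)]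
--     k = len(av) - len(bv)
--     return av[:k] + [x - y for x, y in zip(av[k:], bv)]
-- ===== Notes on version B (the rewrite author's own statement) =====
-- stated objective: simpler
-- what changed: Replaces deepcopies, prepend-padding loops and an indexed subtraction loop by a slice-and-zip decomposition: av's unmatched prefix is kept verbatim (subtracting an implicit 0 is the identity) and the aligned tails are subtracted pairwise with zip, with no padding, no indices and no mutation.
import Mathlib
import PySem

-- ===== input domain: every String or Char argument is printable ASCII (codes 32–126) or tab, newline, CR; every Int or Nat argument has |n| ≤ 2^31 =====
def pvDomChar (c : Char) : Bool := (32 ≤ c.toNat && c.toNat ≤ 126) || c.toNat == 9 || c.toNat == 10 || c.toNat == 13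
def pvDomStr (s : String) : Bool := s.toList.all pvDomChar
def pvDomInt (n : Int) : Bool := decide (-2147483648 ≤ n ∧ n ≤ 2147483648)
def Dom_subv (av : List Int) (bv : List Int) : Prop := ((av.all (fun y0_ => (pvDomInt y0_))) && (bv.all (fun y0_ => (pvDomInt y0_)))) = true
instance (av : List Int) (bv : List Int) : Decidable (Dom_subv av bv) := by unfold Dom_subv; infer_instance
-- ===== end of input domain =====

-- B replaces A's deepcopies + prepend-padding loops + indexed subtraction loop by a
-- slice-and-zip decomposition: keep av's unmatched prefix verbatim and zip-subtract the
-- aligned tails (objective: simpler; same return value, no padding copies, no mutation).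

-- ===== PORT A =====
def subv (av : List Int) (bv : List Int) : List Int :=
  let a := av
  let b := bv
  let diff : Int := (a.length : Int) - (b.length : Int)
  let a := if diff < 0 then
      (PySem.List.pyRange 0 diff 1).foldl (fun a _ => PySem.List.insert a 0 0) a
    else a
  let b := if ¬ (diff < 0) ∧ diff > 0 then
      (PySem.List.pyRange 0 diff 1).foldl (fun b _ => PySem.List.insert b 0 0) b
    else b
  (PySem.List.pyRange 0 (a.length : Int) 1).foldl
    (fun res i => res ++ [PySem.List.pyGetD a i 0 - PySem.List.pyGetD b i 0]) []

-- ===== PORT B =====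
-- av[:k] / av[k:] with 0 ≤ k ≤ len(av) are List.take / List.drop; zip is List.zip.
def subv_alt (av : List Int) (bv : List Int) : List Int :=
  if av.length ≤ bv.length then
    (av.zip bv).map (fun p => p.1 - p.2)
  else
    let k := av.length - bv.length
    av.take k ++ ((av.drop k).zip bv).map (fun p => p.1 - p.2)

-- ===== PRECONDITION & SPEC =====
def Spec_subv (av : List Int) (bv : List Int) (out : List Int) : Prop := out = subv_alt av bv
instance (av : List Int) (bv : List Int) (out : List Int) : Decidable (Spec_subv av bv out) := by unfold Spec_subv; infer_instance

-- ===== CLAIM (what is proved, stated in full; the proofs are below) =====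
def Claim_equal_subv : Prop := ∀ (av : List Int) (bv : List Int), Dom_subv av bv → Spec_subv av bv (subv av bv)

-- ===== LEMMAS AND PROOFS =====

-- padding by repeated insert-at-0 is prepending a block of zeros
theorem pad_foldl (l : List Int) (b : List Int) :
    l.foldl (fun b (_ : Int) => PySem.List.insert b 0 0) b = List.replicate l.length 0 ++ b := by
  induction l generalizing b with
  | nil => rfl
  | cons x xs ih =>
      simp [List.foldl, PySem.List.insert_zero, List.replicate_succ']

theorem map_pyRange_sub (av c : List Int) :
    (PySem.List.pyRange 0 (av.length : Int) 1).map
        (fun i => PySem.List.pyGetD av i 0 - PySem.List.pyGetD c i 0) =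
      (List.range av.length).map (fun i => av.getD i 0 - c.getD i 0) := by
  rw [PySem.List.pyRange_zero_nat, List.map_map]
  apply List.map_congr_left
  intro k _
  simp [PySem.List.pyGetD_natCast, List.getD]

-- A's result in canonical form: index map against a zero-padded bv
theorem subv_eq_canon (av bv : List Int) :
    subv av bv = (List.range av.length).map
      (fun i => av.getD i 0 - (List.replicate (av.length - bv.length) (0:Int) ++ bv).getD i 0) := by
  unfold subv
  simp only []
  set n := av.length
  set m := bv.length
  by_cases h : (n : Int) - (m : Int) < 0
  · have hnil : PySem.List.pyRange 0 ((n : Int) - (m : Int)) 1 = [] :=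
      PySem.List.pyRange_one_eq_nil (by omega)
    have hk : n - m = 0 := by omega
    simp only [if_pos h, hnil, List.foldl_nil, hk, List.replicate_zero, List.nil_append]
    rw [PySem.List.foldl_append_singleton_eq_map]
    simpa using map_pyRange_sub av bv
  · by_cases h2 : (0:Int) < (n : Int) - (m : Int)
    · have hcond : ¬ ((n:Int) - (m:Int) < 0) ∧ (n:Int) - (m:Int) > 0 := ⟨h, h2⟩
      simp only [if_neg h, if_pos hcond]
      rw [pad_foldl, PySem.List.foldl_append_singleton_eq_map]
      have hlr : (PySem.List.pyRange 0 ((n:Int) - (m:Int)) 1).length = n - m := by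
        rw [PySem.List.length_pyRange_one]; omega
      rw [hlr]
      simpa using map_pyRange_sub av (List.replicate (n - m) 0 ++ bv)
    · have hk : n - m = 0 := by omega
      have hcond : ¬ (¬ ((n:Int) - (m:Int) < 0) ∧ (n:Int) - (m:Int) > 0) := by
        intro hc; exact h2 hc.2
      simp only [if_neg h, if_neg hcond, hk, List.replicate_zero, List.nil_append]
      rw [PySem.List.foldl_append_singleton_eq_map]
      simpa using map_pyRange_sub av bv

-- B's result in the same canonical form, via getElem extensionality
theorem subv_alt_eq_canon (av bv : List Int) :
    subv_alt av bv = (List.range av.length).map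
      (fun i => av.getD i 0 - (List.replicate (av.length - bv.length) (0:Int) ++ bv).getD i 0) := by
  unfold subv_alt
  by_cases h : av.length ≤ bv.length
  · have hk : av.length - bv.length = 0 := Nat.sub_eq_zero_of_le h
    rw [if_pos h, hk]
    apply List.ext_getElem
    · simp; omega
    · intro i h1 h2
      have hi : i < av.length := by simpa using h2
      have hib : i < bv.length := lt_of_lt_of_le hi h
      simp only [List.getElem_map, List.getElem_zip, List.getElem_range,
        List.replicate_zero, List.nil_append, List.getD,
        List.getElem?_eq_getElem hi, List.getElem?_eq_getElem hib, Option.getD_some]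
  · rw [if_neg h]
    have hmn : bv.length < av.length := Nat.lt_of_not_le h
    apply List.ext_getElem
    · simp; omega
    · intro i h1 h2
      have hi : i < av.length := by simpa using h2
      simp only [List.getElem_map, List.getElem_range, List.getD,
        List.getElem?_eq_getElem hi, Option.getD_some]
      by_cases hik : i < av.length - bv.length
      · rw [List.getElem_append_left (by simpa using hik)]
        rw [List.getElem_take, List.getElem?_append_left (by simpa using hik)]
        simp [hik]
      · have hik' : av.length - bv.length ≤ i := Nat.le_of_not_lt hik
        have hlen : (List.take (av.length - bv.length) av).length = av.length - bv.length := by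
          simp
        rw [List.getElem_append_right (by omega)]
        rw [List.getElem?_append_right (by simpa using hik')]
        simp only [List.getElem_map, List.getElem_zip, hlen, List.length_replicate]
        have him : i - (av.length - bv.length) < bv.length := by omega
        rw [List.getElem?_eq_getElem him, Option.getD_some, List.getElem_drop]
        have hidx : av.length - bv.length + (i - (av.length - bv.length)) = i := by omega
        simp only [hidx]

-- ===== VERDICT (by name: the statement is the Claim_ definition above) =====
theorem subv_spec : Claim_equal_subv := by
  intro av bv _
  unfold Spec_subv
  rw [subv_eq_canon, subv_alt_eq_canon]
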